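-- pv_equiv track=rewrite | github.com/nic803/tmk-structural-planner-teacher | tmk-structural-planner/app.py | exits
-- ===== SOURCE A (Python) =====
-- from typing import Dict, List, Set, Tuple
--
-- Route = Tuple[int, int]
--
-- def exits(product: int) -> List[Route]:
--     out: List[Route] = []
--     for d in range(1, 11):
--         if product % d == 0:
--             q = product // d
--             if 1 <= q <= 10:
--                 out.append((d, q))
--     return out
-- ===== SOURCE B (Python) =====
-- def exits(product):
--     return [(d, q) for d in range(1, 11) for q in range(1, 11) if d * q == product]
-- ===== Notes on version B (the rewrite author's own statement) =====
-- stated objective: alternative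
-- what changed: B replaces A's division-based single pass (modulus test then q = product // d, accumulated in a loop) with a comprehension over all pairs (d, q) in 1..10 testing d*q == product by multiplication only.
import Mathlib
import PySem

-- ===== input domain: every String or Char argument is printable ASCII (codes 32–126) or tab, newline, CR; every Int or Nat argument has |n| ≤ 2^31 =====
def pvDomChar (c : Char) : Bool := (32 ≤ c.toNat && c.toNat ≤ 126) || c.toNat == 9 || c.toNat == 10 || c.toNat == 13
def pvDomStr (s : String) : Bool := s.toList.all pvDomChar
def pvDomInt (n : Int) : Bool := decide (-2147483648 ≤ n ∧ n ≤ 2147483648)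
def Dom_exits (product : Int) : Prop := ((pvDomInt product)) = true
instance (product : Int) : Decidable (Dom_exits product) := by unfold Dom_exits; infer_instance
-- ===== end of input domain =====

-- B replaces A's division-based accumulator loop with a comprehension over all pairs
-- (d, q) in 1..10 tested by multiplication d*q == product (objective: alternative algorithm).

-- ===== PORT A =====
def exits (product : Int) : List (Int × Int) :=
  (PySem.List.pyRange 1 11 1).foldl (fun out d =>
    if PySem.Int.mod product d = 0 then
      let q := PySem.Int.floordiv product d
      if 1 ≤ q ∧ q ≤ 10 then out ++ [(d, q)] else out
    else out) []

-- ===== PORT B =====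
-- the comprehension [(d, q) for d in … for q in … if d*q == product] as flatMap/filter/map
def exits_alt (product : Int) : List (Int × Int) :=
  (PySem.List.pyRange 1 11 1).flatMap (fun d =>
    ((PySem.List.pyRange 1 11 1).filter (fun q => d * q == product)).map (fun q => (d, q)))

-- ===== PRECONDITION & SPEC =====
def Spec_exits (product : Int) (out : List (Int × Int)) : Prop := out = exits_alt product
instance (product : Int) (out : List (Int × Int)) : Decidable (Spec_exits product out) := by unfold Spec_exits; infer_instance

-- ===== CLAIM (what is proved, stated in full; the proofs are below) =====
def Claim_equal_exits : Prop := ∀ (product : Int), Dom_exits product → Spec_exits product (exits product)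

-- ===== LEMMAS AND PROOFS =====

-- generic: conditional-append fold is init ++ filtered-map
theorem pv_foldl_app (p : Int → Prop) [DecidablePred p] (f : Int → Int × Int) :
    ∀ (l : List Int) (acc : List (Int × Int)),
      l.foldl (fun a x => if p x then a ++ [f x] else a) acc
        = acc ++ (l.filter (fun x => decide (p x))).map f := by
  intro l
  induction l with
  | nil => intro acc; simp
  | cons x t ih =>
    intro acc
    simp only [List.foldl_cons, List.filter_cons, ih]
    by_cases h : p x <;> simp [h]

theorem pv_range_eval : PySem.List.pyRange 1 11 1 = [1,2,3,4,5,6,7,8,9,10] := by decide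

-- A as init ++ filtered-map
theorem pv_exits_eq (product : Int) :
    exits product
      = ((PySem.List.pyRange 1 11 1).filter (fun d => decide ((PySem.Int.mod product d = 0 ∧ 1 ≤ PySem.Int.floordiv product d ∧ PySem.Int.floordiv product d ≤ 10)))).map
          (fun d => (d, PySem.Int.floordiv product d)) := by
  have hfun : (fun (out : List (Int × Int)) (d : Int) =>
      if PySem.Int.mod product d = 0 then
        let q := PySem.Int.floordiv product d
        if 1 ≤ q ∧ q ≤ 10 then out ++ [(d, q)] else out
      else out)
      = (fun out d => if (PySem.Int.mod product d = 0 ∧ 1 ≤ PySem.Int.floordiv product d ∧ PySem.Int.floordiv product d ≤ 10) then out ++ [(d, PySem.Int.floordiv product d)] else out) := by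
    funext out d
    by_cases h0 : PySem.Int.mod product d = 0 <;>
      by_cases h1 : 1 ≤ PySem.Int.floordiv product d ∧ PySem.Int.floordiv product d ≤ 10 <;>
      simp [h0, h1]
  unfold exits
  rw [hfun, pv_foldl_app (fun d => PySem.Int.mod product d = 0 ∧ 1 ≤ PySem.Int.floordiv product d ∧ PySem.Int.floordiv product d ≤ 10) (fun d => (d, PySem.Int.floordiv product d))]
  simp

-- the key per-d equality: A's single entry equals B's inner comprehension for that d
theorem pv_key (product d : Int) (hd : 1 ≤ d) :
    (if (PySem.Int.mod product d = 0 ∧ 1 ≤ PySem.Int.floordiv product d ∧ PySem.Int.floordiv product d ≤ 10) then [(d, PySem.Int.floordiv product d)] else [])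
      = ((PySem.List.pyRange 1 11 1).filter (fun q => d * q == product)).map
          (fun q => (d, q)) := by
  have hd0 : 0 < d := hd
  have hdne : d ≠ 0 := by omega
  by_cases hc : (PySem.Int.mod product d = 0 ∧ 1 ≤ PySem.Int.floordiv product d ∧ PySem.Int.floordiv product d ≤ 10)
  · obtain ⟨h0, h1, h2⟩ := hc
    rw [PySem.Int.mod_eq_emod_of_pos hd0] at h0
    rw [PySem.Int.floordiv_eq_ediv_of_pos hd0] at h1 h2
    have hmul : d * (product / d) = product := Int.mul_ediv_cancel' (Int.dvd_of_emod_eq_zero h0)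
    rw [if_pos (by constructor <;> [skip; constructor] <;>
      simp [PySem.Int.mod_eq_emod_of_pos hd0, PySem.Int.floordiv_eq_ediv_of_pos hd0, h0, h1, h2] : (PySem.Int.mod product d = 0 ∧ 1 ≤ PySem.Int.floordiv product d ∧ PySem.Int.floordiv product d ≤ 10))]
    rw [PySem.Int.floordiv_eq_ediv_of_pos hd0]
    have hpred : (fun q => d * q == product) = (fun q => q == product / d) := by
      funext q
      rw [Bool.eq_iff_iff]
      simp only [beq_iff_eq]
      constructor
      · intro h; exact mul_left_cancel₀ hdne (by rw [hmul, h])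
      · intro h; rw [h, hmul]
    rw [hpred, pv_range_eval]
    set k := product / d with hk
    interval_cases k <;> simp
  · rw [if_neg hc]
    symm
    rw [List.map_eq_nil_iff, List.filter_eq_nil_iff]
    intro q hq hdq
    have hdq' : d * q = product := by simpa using hdq
    have hqb : 1 ≤ q ∧ q ≤ 10 := by
      rw [pv_range_eval] at hq
      simp at hq
      omega
    apply hc
    refine ⟨?_, ?_, ?_⟩
    · rw [PySem.Int.mod_eq_emod_of_pos hd0, ← hdq']
      exact Int.mul_emod_right d q
    · rw [PySem.Int.floordiv_eq_ediv_of_pos hd0, ← hdq', Int.mul_ediv_cancel_left q hdne]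
      exact hqb.1
    · rw [PySem.Int.floordiv_eq_ediv_of_pos hd0, ← hdq', Int.mul_ediv_cancel_left q hdne]
      exact hqb.2

-- ===== VERDICT (by name: the statement is the Claim_ definition above) =====
theorem exits_spec : Claim_equal_exits := by
  intro product _
  unfold Spec_exits exits_alt
  rw [pv_exits_eq]
  have hA : ∀ (l : List Int),
      (l.filter (fun d => decide ((PySem.Int.mod product d = 0 ∧ 1 ≤ PySem.Int.floordiv product d ∧ PySem.Int.floordiv product d ≤ 10)))).map
        (fun d => (d, PySem.Int.floordiv product d))
      = l.flatMap (fun d =>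
          if (PySem.Int.mod product d = 0 ∧ 1 ≤ PySem.Int.floordiv product d ∧ PySem.Int.floordiv product d ≤ 10) then [(d, PySem.Int.floordiv product d)] else []) := by
    intro l
    induction l with
    | nil => simp
    | cons x t ih =>
      rw [List.filter_cons, List.flatMap_cons, ← ih]
      by_cases h : (PySem.Int.mod product x = 0 ∧ 1 ≤ PySem.Int.floordiv product x ∧ PySem.Int.floordiv product x ≤ 10) <;> simp [h]
  rw [hA]
  conv_lhs => rw [pv_range_eval]
  conv_rhs => rw [pv_range_eval]
  simp only [List.flatMap_cons, List.flatMap_nil]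
  rw [pv_key product 1 (by norm_num), pv_key product 2 (by norm_num),
      pv_key product 3 (by norm_num), pv_key product 4 (by norm_num),
      pv_key product 5 (by norm_num), pv_key product 6 (by norm_num),
      pv_key product 7 (by norm_num), pv_key product 8 (by norm_num),
      pv_key product 9 (by norm_num), pv_key product 10 (by norm_num)]
  rw [pv_range_eval]
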